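-- pv_equiv track=rewrite | github.com/yhyoscar/codingpractice | python/hr_matrix_rotation.py | matrix_to_layers
-- ===== SOURCE A (Python) =====
-- def matrix_to_layers(matrix):
--     m = len(matrix); n = len(matrix[0])
--     nlayer = int(min(m,n)/2)
--     layers = []
--     for i in range(nlayer):
--         layers.append([ matrix[i][i] ])
--         for k in range(1, m-2*i-1):
--             layers[-1].append(matrix[i+k][i])
--         for k in range(n-2*i-1):
--             layers[-1].append(matrix[m-i-1][i+k])
--         for k in range(m-2*i-1):
--             layers[-1].append(matrix[m-i-1-k][n-i-1])
--         for k in range(n-2*i-1):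
--             layers[-1].append(matrix[i][n-i-1-k])
--     return layers, m, n
-- ===== SOURCE B (Python) =====
-- def matrix_to_layers(matrix):
--     m, n = len(matrix), len(matrix[0])
--     layers = []
--     for i in range(min(m, n) // 2):
--         rows = [row[i:n - i] for row in matrix[i:m - i]]
--         ring = ([r[0] for r in rows[:-1]]
--                 + rows[-1][:-1]
--                 + [r[-1] for r in reversed(rows[1:])]
--                 + list(reversed(rows[0][1:])))
--         layers.append(ring)
--     return layers, m, n
-- ===== Notes on version B (the rewrite author's own statement) =====
-- stated objective: alternative
-- what changed: B first extracts the i-th concentric submatrix with row/column slices and then concatenates four slice-built pieces (first column, bottom row, reversed last column, reversed top row) instead of A's four index-arithmetic loops into the original matrix.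
-- outside the precondition, e.g. on matrix_to_layers([[1, 2], [3, 4, 5]]): A returns ([[1, 3, 4, 2]], 2, 2), B returns ([[1, 3, 4, 2]], 2, 2)
import Mathlib
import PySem

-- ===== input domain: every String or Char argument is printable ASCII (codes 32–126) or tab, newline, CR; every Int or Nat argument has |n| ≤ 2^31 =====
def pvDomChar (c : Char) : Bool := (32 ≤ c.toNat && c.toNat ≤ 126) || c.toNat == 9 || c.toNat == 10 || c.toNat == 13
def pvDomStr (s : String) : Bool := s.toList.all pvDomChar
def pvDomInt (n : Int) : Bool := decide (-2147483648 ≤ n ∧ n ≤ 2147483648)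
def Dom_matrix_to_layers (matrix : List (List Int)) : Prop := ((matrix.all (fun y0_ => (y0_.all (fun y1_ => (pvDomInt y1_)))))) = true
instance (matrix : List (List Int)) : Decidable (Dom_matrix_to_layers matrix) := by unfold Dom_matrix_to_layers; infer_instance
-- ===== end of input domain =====

-- B builds each ring by slicing out the concentric submatrix and concatenating four
-- slice-made pieces (first column, bottom row, reversed last column, reversed top row)
-- instead of A's four index-arithmetic loops; objective: alternative decomposition, same cost.

-- ===== PORT A =====
-- matrix[r][c] in totalised form: Pre_ guarantees every index A uses is in range
def mtl_get (matrix : List (List Int)) (r c : Int) : Int :=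
  PySem.List.pyGetD (PySem.List.pyGetD matrix r ([] : List Int)) c 0

-- the body of A's outer loop: one layer, built by four index loops
def mtlA_ring (matrix : List (List Int)) (m n i : Int) : List Int :=
  let cur := [mtl_get matrix i i]
  let cur := (PySem.List.pyRange 1 (m - 2*i - 1) 1).foldl
      (fun cur k => cur ++ [mtl_get matrix (i + k) i]) cur
  let cur := (PySem.List.pyRange 0 (n - 2*i - 1) 1).foldl
      (fun cur k => cur ++ [mtl_get matrix (m - i - 1) (i + k)]) cur
  let cur := (PySem.List.pyRange 0 (m - 2*i - 1) 1).foldl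
      (fun cur k => cur ++ [mtl_get matrix (m - i - 1 - k) (n - i - 1)]) cur
  let cur := (PySem.List.pyRange 0 (n - 2*i - 1) 1).foldl
      (fun cur k => cur ++ [mtl_get matrix i (n - i - 1 - k)]) cur
  cur

def matrix_to_layers (matrix : List (List Int)) : List (List Int) × Int × Int :=
  let m : Int := matrix.length
  let n : Int := (PySem.List.pyGetD matrix 0 ([] : List Int)).length
  let nlayer : Int := PySem.Int.floordiv (min m n) 2
  let layers : List (List Int) :=
    (PySem.List.pyRange 0 nlayer 1).foldl
      (fun layers i => layers ++ [mtlA_ring matrix m n i]) []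
  (layers, m, n)

-- ===== PORT B =====
-- the body of B's outer loop: one layer = the sliced-out submatrix 'rows', then
-- first column of rows[:-1], bottom row rows[-1][:-1], reversed last column of rows[1:],
-- reversed top row rows[0][1:]
def mtlB_ring (matrix : List (List Int)) (m n i : Int) : List Int :=
  let rows : List (List Int) :=
    (PySem.List.slice matrix (some i) (some (m - i))).map
      (fun row => PySem.List.slice row (some i) (some (n - i)))
  ((PySem.List.slice rows none (some (-1))).map (fun r => PySem.List.pyGetD r 0 0))
    ++ PySem.List.slice (PySem.List.pyGetD rows (-1) ([] : List Int)) none (some (-1))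
    ++ ((PySem.List.slice rows (some 1) none).reverse.map
          (fun r => PySem.List.pyGetD r (-1) 0))
    ++ (PySem.List.slice (PySem.List.pyGetD rows 0 ([] : List Int)) (some 1) none).reverse

def matrix_to_layers_alt (matrix : List (List Int)) : List (List Int) × Int × Int :=
  let m : Int := matrix.length
  let n : Int := (PySem.List.pyGetD matrix 0 ([] : List Int)).length
  let layers : List (List Int) :=
    (PySem.List.pyRange 0 (PySem.Int.floordiv (min m n) 2) 1).foldl
      (fun layers i => layers ++ [mtlB_ring matrix m n i]) []
  (layers, m, n)

-- ===== PRECONDITION & SPEC =====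
-- Pre_ excludes the empty matrix, where Python's matrix[0] raises IndexError, and ragged
-- matrices with at least one ring (both dimensions ≥ 2), where A may index past the end of a
-- short row and raise IndexError or, when the visited cells happen to exist, returns a value
-- that depends on the accidental shape of the rows.
def Pre_matrix_to_layers (matrix : List (List Int)) : Prop :=
  matrix ≠ [] ∧
    (matrix.length < 2 ∨ (matrix.headD []).length < 2 ∨
      ∀ row ∈ matrix, row.length = (matrix.headD []).length)
instance (matrix : List (List Int)) : Decidable (Pre_matrix_to_layers matrix) := by
  unfold Pre_matrix_to_layers; infer_instance

def pvWitness_matrix_to_layers : List (List Int) :=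
  [[1, 2, 3], [4, 5, 6], [7, 8, 9], [10, 11, 12]]

def Spec_matrix_to_layers (matrix : List (List Int)) (out : List (List Int) × Int × Int) : Prop := out = matrix_to_layers_alt matrix
instance (matrix : List (List Int)) (out : List (List Int) × Int × Int) : Decidable (Spec_matrix_to_layers matrix out) := by unfold Spec_matrix_to_layers; infer_instance

-- ===== CLAIM (what is proved, stated in full; the proofs are below) =====
def Claim_equal_matrix_to_layers : Prop := ∀ (matrix : List (List Int)), Dom_matrix_to_layers matrix → Pre_matrix_to_layers matrix → Spec_matrix_to_layers matrix (matrix_to_layers matrix)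

-- ===== LEMMAS AND PROOFS =====

-- a clamped drop/take slice, entirely in range, is a map of indexed reads
theorem mtl_drop_take_eq_map_range {α : Type} (l : List α) (d : α) (p q : Nat)
    (h : p + q ≤ l.length) :
    (l.drop p).take q = (List.range q).map (fun s => l.getD (p + s) d) := by
  apply List.ext_getElem
  · simp; omega
  · intro j h1 h2
    simp only [List.length_take, List.length_drop, List.length_map, List.length_range] at h1 h2
    simp only [List.getElem_take, List.getElem_drop, List.getElem_map, List.getElem_range]
    rw [List.getD_eq_getElem l d (by omega)]

-- reversing a map over range reads the indices back to front
theorem mtl_reverse_map_range {α : Type} (f : Nat → α) (k : Nat) :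
    ((List.range k).map f).reverse = (List.range k).map (fun t => f (k - 1 - t)) := by
  apply List.ext_getElem
  · simp
  · intro j h1 h2
    simp only [List.getElem_reverse, List.getElem_map, List.getElem_range,
      List.length_map, List.length_range]

-- the sliced-out submatrix, on a rectangular matrix, is a double map of indexed reads
theorem mtl_rows_eq (matrix : List (List Int)) (m n i : Int) (a b : Nat)
    (hm : m = (matrix.length : Int)) (hi : 0 ≤ i)
    (ha : m - 2*i = (a : Int) + 2) (hb : n - 2*i = (b : Int) + 2)
    (hrect : ∀ row ∈ matrix, (row.length : Int) = n) :
    (PySem.List.slice matrix (some i) (some (m - i))).map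
      (fun row => PySem.List.slice row (some i) (some (n - i)))
    = (List.range (a + 2)).map (fun t : Nat =>
        (List.range (b + 2)).map (fun s : Nat => mtl_get matrix (i + (t : Int)) (i + (s : Int)))) := by
  rw [PySem.List.slice_toNat matrix hi (by omega)]
  rw [show (m - i).toNat - i.toNat = a + 2 by omega]
  rw [mtl_drop_take_eq_map_range matrix ([] : List Int) i.toNat (a + 2) (by omega)]
  rw [List.map_map]
  apply List.map_congr_left
  intro t ht
  rw [List.mem_range] at ht
  have hidx : i.toNat + t < matrix.length := by omega
  have hrow : matrix.getD (i.toNat + t) [] = matrix[i.toNat + t] :=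
    List.getD_eq_getElem _ _ hidx
  have hlen : ((matrix[i.toNat + t]'hidx).length : Int) = n := hrect _ (List.getElem_mem hidx)
  show PySem.List.slice (matrix.getD (i.toNat + t) []) (some i) (some (n - i)) = _
  rw [hrow, PySem.List.slice_toNat _ hi (by omega)]
  rw [show (n - i).toNat - i.toNat = b + 2 by omega]
  rw [mtl_drop_take_eq_map_range _ (0 : Int) i.toNat (b + 2) (by omega)]
  apply List.map_congr_left
  intro s hs
  unfold mtl_get
  rw [show i + (t : Int) = ((i.toNat + t : Nat) : Int) by omega,
      show i + (s : Int) = ((i.toNat + s : Nat) : Int) by omega]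
  rw [PySem.List.pyGetD_natCast, PySem.List.pyGetD_natCast, hrow]

-- reading pieces out of a map over a range
theorem mtl_map_range_last {α : Type} (f : Nat → α) (k : Nat) (d : α) :
    PySem.List.pyGetD ((List.range (k + 1)).map f) (-1) d = f k := by
  rw [List.range_succ, List.map_append]
  exact PySem.List.pyGetD_neg_one_append_singleton _ _ _

theorem mtl_map_range_head {α : Type} (f : Nat → α) (k : Nat) (d : α) :
    PySem.List.pyGetD ((List.range (k + 1)).map f) 0 d = f 0 := by
  rw [List.range_succ_eq_map, List.map_cons]
  exact PySem.List.pyGetD_zero_cons _ _ _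

theorem mtl_map_range_dropLast {α : Type} (f : Nat → α) (k : Nat) :
    ((List.range (k + 1)).map f).dropLast = (List.range k).map f := by
  rw [List.range_succ, List.map_append]
  simp

theorem mtl_map_range_tail {α : Type} (f : Nat → α) (k : Nat) :
    ((List.range (k + 1)).map f).tail = (List.range k).map (fun t => f (t + 1)) := by
  rw [List.range_succ_eq_map, List.map_cons, List.tail_cons, List.map_map]
  rfl

-- A's ring equals B's ring whenever the layer really exists
theorem mtl_ring_eq (matrix : List (List Int)) (m n i : Int)
    (hm : m = (matrix.length : Int))
    (hrect : ∀ row ∈ matrix, (row.length : Int) = n)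
    (hi : 0 ≤ i) (hh : 2 ≤ m - 2*i) (hw : 2 ≤ n - 2*i) :
    mtlA_ring matrix m n i = mtlB_ring matrix m n i := by
  obtain ⟨a, ha⟩ : ∃ a : Nat, m - 2*i = (a : Int) + 2 := ⟨(m - 2*i - 2).toNat, by omega⟩
  obtain ⟨b, hb⟩ : ∃ b : Nat, n - 2*i = (b : Int) + 2 := ⟨(n - 2*i - 2).toNat, by omega⟩
  have hm2 : m = (a : Int) + 2*i + 2 := by omega
  have hn2 : n = (b : Int) + 2*i + 2 := by omega
  set g := mtl_get matrix with hg
  -- normalize B to four maps over ranges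
  unfold mtlB_ring
  rw [mtl_rows_eq matrix m n i a b hm hi ha hb hrect]
  simp only [PySem.List.slice_to_neg_one, PySem.List.slice_from_one,
    mtl_map_range_last, mtl_map_range_head, mtl_map_range_dropLast, mtl_map_range_tail,
    List.map_reverse, List.map_map, Function.comp_def, mtl_reverse_map_range, ← hg]
  -- normalize A to four maps over ranges
  unfold mtlA_ring
  simp only [PySem.List.foldl_append_singleton_eq_map, ← hg]
  rw [show (m - 2*i - 1 : Int) = ((a : Int) + 1) by omega,
      show (n - 2*i - 1 : Int) = ((b : Int) + 1) by omega]
  rw [show ((a : Int) + 1) = ((a + 1 : Nat) : Int) by push_cast; ring,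
      show ((b : Int) + 1) = ((b + 1 : Nat) : Int) by push_cast; ring]
  rw [PySem.List.pyRange_one 1, PySem.List.pyRange_zero_nat, PySem.List.pyRange_zero_nat]
  rw [show (((a + 1 : Nat) : Int) - 1).toNat = a by omega]
  rw [List.map_map, List.map_map, List.map_map, List.map_map]
  -- fuse A's start cell with its left-column loop
  have hA1 : [g i i] ++ (List.range a).map ((fun k => g (i + k) i) ∘ fun k : Nat => 1 + (k : Int))
      = (List.range (a + 1)).map (fun t : Nat => g (i + (t : Int)) (i + (0 : Nat))) := by
    rw [List.range_succ_eq_map, List.map_cons, List.map_map]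
    refine congrArg₂ List.cons (by norm_num) (List.map_congr_left ?_)
    intro k _
    show g (i + (1 + (k : Int))) i = g (i + ((k + 1 : Nat) : Int)) (i + (0 : Nat))
    congr 1 <;> push_cast <;> ring
  rw [← hA1]
  simp only [List.append_assoc, List.singleton_append]
  refine congrArg (List.cons (g i i)) ?_
  refine congrArg₂ (· ++ · : List Int → List Int → List Int) rfl (congrArg₂ (· ++ · : List Int → List Int → List Int) ?_ (congrArg₂ (· ++ · : List Int → List Int → List Int) ?_ ?_))
  · apply List.map_congr_left
    intro k hk
    show g (m - i - 1) (i + (k : Int)) = g (i + ((a + 1 : Nat) : Int)) (i + (k : Int))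
    congr 1
    push_cast
    omega
  · apply List.map_congr_left
    intro k hk
    rw [List.mem_range] at hk
    show g (m - i - 1 - (k : Int)) (n - i - 1)
        = g (i + ((a + 1 - 1 - k + 1 : Nat) : Int)) (i + ((b + 1 : Nat) : Int))
    congr 1 <;> push_cast [show k ≤ a by omega] <;> omega
  · apply List.map_congr_left
    intro k hk
    rw [List.mem_range] at hk
    show g i (n - i - 1 - (k : Int)) = g (i + ((0 : Nat) : Int)) (i + ((b + 1 - 1 - k + 1 : Nat) : Int))
    congr 1 <;> push_cast [show k ≤ b by omega] <;> omega

theorem mtl_ports_eq (matrix : List (List Int)) (hpre : Pre_matrix_to_layers matrix) :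
    matrix_to_layers matrix = matrix_to_layers_alt matrix := by
  obtain ⟨hne, hdisj⟩ := hpre
  unfold matrix_to_layers matrix_to_layers_alt
  refine congrArg (fun l => (l, ((matrix.length : Int),
    ((PySem.List.pyGetD matrix 0 ([] : List Int)).length : Int)))) ?_
  apply PySem.List.foldl_congr_mem
  intro acc x hx
  rw [PySem.List.mem_pyRange_one] at hx
  have hmul : (x + 1) * 2 ≤ min (matrix.length : Int)
      ((PySem.List.pyGetD matrix 0 ([] : List Int)).length : Int) :=
    (PySem.Int.le_floordiv_iff_mul_le (by norm_num)).mp (by omega)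
  have h1 := min_le_left (matrix.length : Int)
      ((PySem.List.pyGetD matrix 0 ([] : List Int)).length : Int)
  have h2 := min_le_right (matrix.length : Int)
      ((PySem.List.pyGetD matrix 0 ([] : List Int)).length : Int)
  have hrect : ∀ row ∈ matrix,
      ((row.length : Int)) = ((PySem.List.pyGetD matrix 0 ([] : List Int)).length : Int) := by
    obtain ⟨r, rest, rfl⟩ : ∃ r rest, matrix = r :: rest := by
      cases matrix with
      | nil => exact absurd rfl hne
      | cons r rest => exact ⟨r, rest, rfl⟩
    rw [PySem.List.pyGetD_zero_cons] at *
    rcases hdisj with hlt | hlt | hrect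
    · exfalso; simp only [List.length_cons] at *; omega
    · exfalso; simp only [List.headD_cons] at hlt; omega
    · intro row hrow
      simp only [List.headD_cons] at hrect
      exact_mod_cast hrect row hrow
  exact congrArg (fun ring => acc ++ [ring])
    (mtl_ring_eq matrix _ _ x rfl hrect (by omega) (by omega) (by omega))

-- ===== VERDICT (by name: the statement is the Claim_ definition above) =====
theorem matrix_to_layers_spec : Claim_equal_matrix_to_layers := by
  intro matrix _ hpre
  unfold Spec_matrix_to_layers
  exact mtl_ports_eq matrix hpre
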